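-- pv_equiv track=rewrite | github.com/Charbelghanime/RSA1024-and-RSA-2048 | RSA.py | getBlocksFromText
-- ===== SOURCE A (Python) =====
-- DEFAULT_BLOCK_SIZE = 128
--
-- BYTE_SIZE = 128
--
-- def getBlocksFromText(message, blockSize=DEFAULT_BLOCK_SIZE):
--     messageBytes = message.encode('ascii')
--
--     blockInts = []
--     for blockStart in range(0, len(messageBytes), blockSize):
--         blockInt = 0
--         for i in range(blockStart, min(blockStart + blockSize, len(messageBytes))):
--             blockInt += messageBytes[i] * (BYTE_SIZE ** (i % blockSize))
--         blockInts.append(blockInt)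
--     return blockInts
-- ===== SOURCE B (Python) =====
-- DEFAULT_BLOCK_SIZE = 128
--
--
-- def getBlocksFromText(message, blockSize=DEFAULT_BLOCK_SIZE):
--     data = message.encode('ascii')
--     blocks = []
--     for start in range(0, len(data), blockSize):
--         value = 0
--         for byte in reversed(data[start:start + blockSize]):
--             value = value * 128 + byte
--         blocks.append(value)
--     return blocks
-- ===== Notes on version B (the rewrite author's own statement) =====
-- stated objective: alternative
-- what changed: Each block's base-128 value is computed by Horner's rule over the reversed slice (value = value*128 + byte) instead of summing byte*128**(i % blockSize) over absolute indices; Pre_ excludes blockSize = 0, where both raise ValueError from range().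
import Mathlib
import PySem

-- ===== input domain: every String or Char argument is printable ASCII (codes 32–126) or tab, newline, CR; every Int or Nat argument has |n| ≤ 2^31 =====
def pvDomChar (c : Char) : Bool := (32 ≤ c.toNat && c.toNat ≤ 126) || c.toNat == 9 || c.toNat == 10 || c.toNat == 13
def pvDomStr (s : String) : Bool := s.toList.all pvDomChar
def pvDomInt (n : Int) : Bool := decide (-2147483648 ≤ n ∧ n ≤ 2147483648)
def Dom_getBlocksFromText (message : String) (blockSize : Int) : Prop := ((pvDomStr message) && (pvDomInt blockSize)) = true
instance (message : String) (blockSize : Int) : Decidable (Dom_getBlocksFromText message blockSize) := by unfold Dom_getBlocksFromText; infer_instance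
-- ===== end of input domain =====

-- B computes each block's base-128 value by Horner's rule on the reversed slice; A sums byte * 128^(i % blockSize) over absolute indices.

-- ===== PORT A =====
def getBlocksFromText (message : String) (blockSize : Int) : List Int :=
  let messageBytes : List Int := message.toList.map (fun c => (c.toNat : Int))
  (PySem.List.pyRange 0 (messageBytes.length : Int) blockSize).foldl
    (fun blockInts blockStart =>
      let blockInt :=
        (PySem.List.pyRange blockStart (min (blockStart + blockSize) (messageBytes.length : Int)) 1).foldl
          (fun blockInt i =>
            blockInt + PySem.List.pyGetD messageBytes i 0 * (128 : Int) ^ (PySem.Int.mod i blockSize).toNat)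
          0
      blockInts ++ [blockInt])
    []

-- ===== PORT B =====
def getBlocksFromText_alt (message : String) (blockSize : Int) : List Int :=
  let data : List Int := message.toList.map (fun c => (c.toNat : Int))
  (PySem.List.pyRange 0 (data.length : Int) blockSize).foldl
    (fun blocks start =>
      let chunk := PySem.List.slice data (some start) (some (start + blockSize))
      blocks ++ [chunk.reverse.foldl (fun value byte => value * 128 + byte) 0])
    []

-- ===== PRECONDITION & SPEC =====
-- Pre_ excludes only blockSize = 0, where range(0, len, 0) raises ValueError in both A and B.
def Pre_getBlocksFromText (message : String) (blockSize : Int) : Prop := blockSize ≠ 0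
instance (message : String) (blockSize : Int) : Decidable (Pre_getBlocksFromText message blockSize) := by unfold Pre_getBlocksFromText; infer_instance
def pvWitness_getBlocksFromText : String × Int := ("Hi!", 2)

def Spec_getBlocksFromText (message : String) (blockSize : Int) (out : List Int) : Prop := out = getBlocksFromText_alt message blockSize
instance (message : String) (blockSize : Int) (out : List Int) : Decidable (Spec_getBlocksFromText message blockSize out) := by unfold Spec_getBlocksFromText; infer_instance

-- ===== CLAIM (what is proved, stated in full; the proofs are below) =====
def Claim_equal_getBlocksFromText : Prop := ∀ (message : String) (blockSize : Int), Dom_getBlocksFromText message blockSize → Pre_getBlocksFromText message blockSize → Spec_getBlocksFromText message blockSize (getBlocksFromText message blockSize)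

-- ===== LEMMAS AND PROOFS =====

-- range(0, n, s) is empty for a negative step and n ≥ 0
lemma pyRange_neg_step_nil (a b s : Int) (h : s < 0) (hab : a ≤ b) :
    PySem.List.pyRange a b s = [] := by
  unfold PySem.List.pyRange
  rw [if_neg (by omega), if_neg (by omega), if_neg (by omega)]
  simp

-- Horner's rule (folded from the high end) is the positional base-128 sum
lemma horner_eq_sum (l : List Int) :
    l.foldr (fun b v => v * 128 + b) 0
      = ((List.range l.length).map (fun j => l.getD j 0 * 128 ^ j)).sum := by
  induction l with
  | nil => simp
  | cons c t ih =>
    have h : ((fun j => (c :: t)[j]?.getD 0 * 128 ^ j) ∘ Nat.succ)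
        = fun j => (t[j]?.getD 0 * 128 ^ j) * 128 := by
      funext j; simp [pow_succ]; ring
    simp [List.range_succ_eq_map, List.map_map, ih]
    rw [h, List.sum_map_mul_right]
    ring

-- one block: A's power sum over absolute indices = B's Horner value of the slice
lemma block_eq (bytes : List Int) (B s : Int) (hB : 0 < B) (hs : 0 ≤ s)
    (hlt : s < (bytes.length : Int)) (hdvd : B ∣ s) :
    (PySem.List.pyRange s (min (s + B) (bytes.length : Int)) 1).foldl
      (fun acc i => acc + PySem.List.pyGetD bytes i 0 * (128 : Int) ^ (PySem.Int.mod i B).toNat) 0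
    = (PySem.List.slice bytes (some s) (some (s + B))).reverse.foldl
        (fun v b => v * 128 + b) 0 := by
  set e : Int := min (s + B) (bytes.length : Int) with he
  have hchunk : PySem.List.slice bytes (some s) (some (s + B))
      = (bytes.drop s.toNat).take B.toNat := by
    rw [PySem.List.slice_toNat bytes hs (by omega)]
    congr 1; omega
  set chunk : List Int := (bytes.drop s.toNat).take B.toNat with hc
  have hlen : chunk.length = (e - s).toNat := by
    simp [hc]; omega
  rw [hchunk, List.foldl_reverse]
  have hrhs := horner_eq_sum chunk
  rw [hrhs, PySem.List.foldl_add, PySem.List.pyRange_one, List.map_map, hlen]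
  rw [zero_add]
  congr 1
  apply List.map_congr_left
  intro j hj
  simp only [List.mem_range] at hj
  obtain ⟨q, hq⟩ := hdvd
  have hjB : (j : Int) < B := by omega
  have hmod : PySem.Int.mod (s + (j : Int)) B = (j : Int) := by
    rw [PySem.Int.mod_eq_emod_of_pos hB, hq]
    rw [show B * q + (j : Int) = (j : Int) + B * q from by ring]
    rw [Int.add_mul_emod_self_left]
    exact Int.emod_eq_of_lt (by omega) hjB
  have hidx : PySem.List.pyGetD bytes (s + (j : Int)) 0 = bytes[s.toNat + j]'(by omega) := by
    rw [PySem.List.pyGetD_eq_getElem bytes 0 (by omega) (by omega)]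
    congr 1; omega
  have hcj : chunk.getD j 0 = bytes[s.toNat + j]'(by omega) := by
    rw [List.getD_eq_getElem chunk 0 (by omega)]
    simp [hc, List.getElem_take, List.getElem_drop]
  simp only [Function.comp]
  rw [hmod, hidx, hcj]
  simp

-- ===== VERDICT (by name: the statement is the Claim_ definition above) =====
theorem getBlocksFromText_spec : Claim_equal_getBlocksFromText := by
  intro message blockSize _ hpre
  unfold Spec_getBlocksFromText getBlocksFromText getBlocksFromText_alt
  simp only []
  set bytes : List Int := message.toList.map (fun c => (c.toNat : Int)) with hb
  rcases lt_or_gt_of_ne hpre with hneg | hpos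
  · rw [pyRange_neg_step_nil 0 (bytes.length : Int) blockSize hneg (by positivity)]
    rfl
  · apply PySem.List.foldl_congr_mem
    intro acc x hx
    rw [PySem.List.mem_pyRange_iff_of_pos hpos] at hx
    obtain ⟨h0, hlt, hdvd⟩ := hx
    rw [sub_zero] at hdvd
    congr 1
    rw [block_eq bytes blockSize x hpos h0 hlt hdvd]
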